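-- pv_equiv track=rewrite | github.com/Suraj1199/CompetetiveCoding_Solutions | HackerRank/Mathematics/Bus_Station.py | solve
-- ===== SOURCE A (Python) =====
-- def solve(A):
--     L = sum(A)
--     R = 0
--     R = 0
--     ret = ""
--     for i in A[::-1]:
--         if L == 0:
--             break
--         if R % L == 0:
--             b = 0
--             for j in A:
--                 b += j
--                 if b == L:
--                     b = 0
--                 elif b > L:
--                     break
--             if b == 0:
--                 ret = str(L)+ " " + ret
--         L -= i
--         R += i
--     return ret
-- ===== SOURCE B (Python) =====
-- def step(j, L, b, dead):
--     if dead: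
--         return (L, b, True)
--     b += j
--     if b == L:
--         return (L, 0, False)
--     if b > L:
--         return (L, b, True)
--     return (L, b, False)
--
--
-- def solve(A):
--     S = sum(A)
--     P = []
--     acc = 0
--     for x in A:
--         acc += x
--         P.append(acc)
--     cand = []
--     for p in reversed(P):
--         if p == 0:
--             break
--         if S % p == 0:
--             cand.append(p)
--     state = [(L, 0, False) for L in cand]
--     for j in A:
--         state = [step(j, L, b, dead) for (L, b, dead) in state]
--     good = [str(L) for (L, b, _) in reversed(state) if b == 0]
--     return " ".join(good) + " " if good else ""
-- ===== Notes on version B (the rewrite author's own statement) =====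
-- stated objective: alternative
-- what changed: B transposes the computation: it precomputes prefix sums, selects candidate block sizes by a divisibility test (S % p == 0 instead of A's (S-L) % L == 0), then makes ONE pass over the array advancing a vector of per-candidate accumulator automata in parallel, so no candidate ever rescans the array; the output is assembled forward with a join instead of A's repeated string prepending.
import Mathlib
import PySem

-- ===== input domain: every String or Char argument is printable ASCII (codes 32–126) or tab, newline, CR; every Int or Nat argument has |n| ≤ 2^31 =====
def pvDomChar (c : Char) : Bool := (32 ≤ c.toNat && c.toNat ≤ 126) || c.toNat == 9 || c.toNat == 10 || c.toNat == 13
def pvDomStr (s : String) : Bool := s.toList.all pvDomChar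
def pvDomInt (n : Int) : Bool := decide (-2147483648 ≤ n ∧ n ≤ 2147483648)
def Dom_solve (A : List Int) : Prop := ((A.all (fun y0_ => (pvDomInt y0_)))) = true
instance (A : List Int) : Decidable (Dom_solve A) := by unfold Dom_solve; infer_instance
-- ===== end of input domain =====

-- B transposes the computation: prefix sums once, candidate block sizes by a divisibility
-- test, then ONE pass over the array advancing all candidates' accumulator automata in
-- parallel (a vector of states), so no candidate ever rescans the array; output built
-- forward with a join. Same results, a different traversal of the data.

-- ===== PORT A =====
-- inner 'for j in A' loop: accumulator b, reset on b == L, break (returning b) on b > L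
def solveInner : List Int → Int → Int → Int
  | [], b, _ => b
  | j :: rest, b, L =>
    if b + j = L then solveInner rest 0 L
    else if b + j > L then b + j
    else solveInner rest (b + j) L

-- outer 'for i in A[::-1]' loop with state (L, R, ret); 'break' returns ret
def solveLoop (A0 : List Int) : List Int → Int → Int → String → String
  | [], _, _, ret => ret
  | i :: rest, L, R, ret =>
    if L = 0 then ret
    else
      solveLoop A0 rest (L - i) (R + i)
        (if PySem.Int.mod R L = 0 then
          (if solveInner A0 0 L = 0 then PySem.Int.toStr L ++ " " ++ ret else ret)
         else ret)

def solve (A : List Int) : String :=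
  solveLoop A ((PySem.List.slice? A none none (-1)).getD []) A.sum 0 ""

-- ===== PORT B =====
-- Source B step(j, L, b, dead): one automaton step for candidate L (frozen once dead)
def stepB (j : Int) (t : Int × Int × Bool) : Int × Int × Bool :=
  if t.2.2 then t
  else if t.2.1 + j = t.1 then (t.1, 0, false)
  else if t.2.1 + j > t.1 then (t.1, t.2.1 + j, true)
  else (t.1, t.2.1 + j, false)

-- Source B candidate loop over reversed(P): break at 0, keep p with S % p == 0
def candLoop (s : Int) : List Int → List Int
  | [] => []
  | p :: r =>
    if p = 0 then []
    else if PySem.Int.mod s p = 0 then p :: candLoop s r else candLoop s r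

-- Source B prefix-sum building loop (accumulator acc)
def buildP : List Int → Int → List Int
  | [], _ => []
  | x :: rest, acc => (acc + x) :: buildP rest (acc + x)

def solve_alt (A : List Int) : String :=
  let s := A.sum
  let P := buildP A 0
  let cand := candLoop s P.reverse
  let state := A.foldl (fun st j => st.map (fun t => stepB j t))
      (cand.map (fun L => (L, (0 : Int), false)))
  let good := (state.reverse.filter (fun t => decide (t.2.1 = 0))).map
      (fun t => PySem.Int.toStr t.1)
  if good = [] then "" else PySem.Str.join " " good ++ " "

-- ===== PRECONDITION & SPEC =====
def Spec_solve (A : List Int) (out : String) : Prop := out = solve_alt A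
instance (A : List Int) (out : String) : Decidable (Spec_solve A out) := by unfold Spec_solve; infer_instance

-- ===== CLAIM (what is proved, stated in full; the proofs are below) =====
def Claim_equal_solve : Prop := ∀ (A : List Int), Dom_solve A → Spec_solve A (solve A)

-- ===== LEMMAS AND PROOFS =====

-- the string A's loop prepends (and B's join appends) for one accepted candidate L
def piece (A0 : List Int) (S L : Int) : String :=
  if PySem.Int.mod (S - L) L = 0 ∧ solveInner A0 0 L = 0 then PySem.Int.toStr L ++ " " else ""

-- A's result over the reversed prefix-sum list (head = longest prefix), stopping at a zero
def emitP (A0 : List Int) (S : Int) : List Int → String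
  | [] => ""
  | p :: rp => if p = 0 then "" else emitP A0 S rp ++ piece A0 S p

-- concatenation of pieces over a list (no stop)
def emitCat (A0 : List Int) (S : Int) : List Int → String
  | [] => ""
  | p :: l => emitCat A0 S l ++ piece A0 S p

lemma buildP_append (xs ys : List Int) (acc : Int) :
    buildP (xs ++ ys) acc = buildP xs acc ++ buildP ys (acc + xs.sum) := by
  induction xs generalizing acc with
  | nil => simp [buildP]
  | cons x xs ih => simp [buildP, ih, add_assoc]

-- A's outer loop computes emitP of the reversed prefix-sum list of the processed prefix
lemma solveLoop_eq_emitP (A0 : List Int) (S : Int) (q : List Int) (ret : String) :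
    solveLoop A0 q q.sum (S - q.sum) ret
      = emitP A0 S ((buildP q.reverse 0).reverse) ++ ret := by
  induction q generalizing ret with
  | nil => simp [solveLoop, buildP, emitP, String.empty_append]
  | cons i q ih =>
    have hb : (buildP ((i :: q).reverse) 0).reverse
        = (i + q.sum) :: (buildP q.reverse 0).reverse := by
      rw [show (i :: q).reverse = q.reverse ++ [i] from by simp, buildP_append]
      simp [buildP, List.sum_reverse, add_comm]
    rw [hb]
    simp only [solveLoop, emitP, List.sum_cons]
    have e1 : i + q.sum - i = q.sum := by ring
    have e2 : S - (i + q.sum) + i = S - q.sum := by ring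
    rw [e1, e2]
    by_cases h0 : i + q.sum = 0
    · simp [h0, String.empty_append]
    · rw [if_neg h0, if_neg h0, ih]
      unfold piece
      by_cases hm : PySem.Int.mod (S - (i + q.sum)) (i + q.sum) = 0 <;>
        by_cases hi : solveInner A0 0 (i + q.sum) = 0 <;>
        simp [hm, hi, String.append_assoc, String.append_empty]

-- emitP stops at the first zero: it is emitCat of the zero-free front
lemma emitP_eq_emitCat (A0 : List Int) (S : Int) (rp : List Int) :
    emitP A0 S rp = emitCat A0 S (rp.takeWhile (fun p => decide (p ≠ 0))) := by
  induction rp with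
  | nil => rfl
  | cons p rp ih =>
    by_cases h : p = 0
    · simp [emitP, emitCat, h]
    · simp [emitP, emitCat, h, ih]

-- B's candidate loop = divisibility filter of the zero-free front of reversed P
lemma candLoop_eq (s : Int) (rp : List Int) :
    candLoop s rp
      = (rp.takeWhile (fun p => decide (p ≠ 0))).filter
          (fun p => decide (PySem.Int.mod s p = 0)) := by
  induction rp with
  | nil => rfl
  | cons p rp ih =>
    by_cases h : p = 0
    · simp [candLoop, h]
    · by_cases hm : PySem.Int.mod s p = 0 <;> simp [candLoop, h, hm, ih]

-- the parallel pass factors: fold of map = map of the per-candidate fold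
lemma foldl_map_comm (A : List Int) (st : List (Int × Int × Bool)) :
    A.foldl (fun st j => st.map (fun t => stepB j t)) st
      = st.map (fun t => A.foldl (fun t j => stepB j t) t) := by
  induction A generalizing st with
  | nil => simp
  | cons a A ih => simp [List.foldl_cons, ih, List.map_map, Function.comp]

-- a dead automaton is frozen
lemma foldl_dead (A : List Int) (L b : Int) :
    A.foldl (fun t j => stepB j t) (L, b, true) = (L, b, true) := by
  induction A with
  | nil => rfl
  | cons a A ih => simpa [List.foldl_cons, stepB] using ih

-- a live automaton runs A's inner scan: key preserved, accumulator = solveInner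
lemma foldl_live (rest : List Int) (L : Int) : ∀ b : Int,
    (rest.foldl (fun t j => stepB j t) (L, b, false)).1 = L ∧
    (rest.foldl (fun t j => stepB j t) (L, b, false)).2.1 = solveInner rest b L := by
  induction rest with
  | nil => intro b; exact ⟨rfl, rfl⟩
  | cons j rest ih =>
    intro b
    simp only [List.foldl_cons, solveInner]
    by_cases h1 : b + j = L
    · have hs : stepB j (L, b, false) = (L, 0, false) := by simp [stepB, h1]
      rw [hs, if_pos h1]; exact ih 0
    · by_cases h2 : b + j > L
      · have hs : stepB j (L, b, false) = (L, b + j, true) := by simp [stepB, h1, h2]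
        rw [hs, if_neg h1, if_pos h2, foldl_dead]; exact ⟨rfl, rfl⟩
      · have hs : stepB j (L, b, false) = (L, b + j, false) := by simp [stepB, h1, h2]
        rw [hs, if_neg h1, if_neg h2]; exact ih (b + j)

-- the two acceptance conditions coincide: (S-L) % L == 0 iff S % L == 0 (both say L ∣ S)
lemma mod_sub_self_eq_zero_iff (S L : Int) :
    PySem.Int.mod (S - L) L = 0 ↔ PySem.Int.mod S L = 0 := by
  rw [PySem.Int.mod_eq_zero_iff_dvd, PySem.Int.mod_eq_zero_iff_dvd]
  constructor
  · intro h; simpa using dvd_add h (dvd_refl L)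
  · intro h; exact dvd_sub h (dvd_refl L)

lemma emitCat_append_singleton (A0 : List Int) (S x : Int) (xs : List Int) :
    emitCat A0 S (xs ++ [x]) = piece A0 S x ++ emitCat A0 S xs := by
  induction xs with
  | nil => simp [emitCat, String.append_empty, String.empty_append]
  | cons p xs ih => simp [emitCat, ih, String.append_assoc]

lemma joinOut_cons (a : String) (r : List String) :
    (if (a :: r : List String) = [] then "" else PySem.Str.join " " (a :: r) ++ " ")
      = (a ++ " ") ++ (if r = [] then "" else PySem.Str.join " " r ++ " ") := by
  cases r with
  | nil =>
    rw [if_neg (List.cons_ne_nil a []), if_pos rfl]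
    apply String.toList_inj.mp
    simp [PySem.Str.join, PySem.Chars.join_singleton]
  | cons b r =>
    rw [if_neg (List.cons_ne_nil a (b :: r)), if_neg (List.cons_ne_nil b r)]
    apply String.toList_inj.mp
    simp [PySem.Str.join, PySem.Chars.join_cons_cons]

-- filter commutes with map (predicate pulled back along the per-candidate run)
lemma filter_map_comm {α β : Type} (l : List α) (f : α → β) (p : β → Bool) :
    (l.map f).filter p = (l.filter (fun x => p (f x))).map f := by
  induction l with
  | nil => rfl
  | cons x l ih => by_cases h : p (f x) <;> simp [h, ih]

-- B's filtered join over an (ascending) candidate list = emitCat of its reverse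
lemma join_filter_eq_emitCat (A0 : List Int) (S : Int) (q : Int → Bool)
    (hc : ∀ L : Int, q L
            = decide (PySem.Int.mod (S - L) L = 0 ∧ solveInner A0 0 L = 0)) :
    ∀ l : List Int,
    (if ((l.filter q).map PySem.Int.toStr) = []
     then ""
     else PySem.Str.join " " ((l.filter q).map PySem.Int.toStr) ++ " ")
      = emitCat A0 S l.reverse := by
  intro l
  induction l with
  | nil => rfl
  | cons x l ih =>
    rw [List.reverse_cons, emitCat_append_singleton]
    by_cases h : PySem.Int.mod (S - x) x = 0 ∧ solveInner A0 0 x = 0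
    · have hfil : List.filter q (x :: l) = x :: List.filter q l := by
        rw [List.filter_cons, hc x, if_pos (decide_eq_true h)]
      rw [hfil, List.map_cons, joinOut_cons, ih]
      simp [piece, h]
    · have hfil : List.filter q (x :: l) = List.filter q l := by
        rw [List.filter_cons, hc x, if_neg (by simp [h])]
      rw [hfil, ih]
      simp [piece, h, String.empty_append]

-- ===== VERDICT (by name: the statement is the Claim_ definition above) =====
theorem solve_spec : Claim_equal_solve := by
  intro A _
  unfold Spec_solve
  have hA : solve A = emitCat A A.sum
      (((buildP A 0).reverse).takeWhile (fun p => decide (p ≠ 0))) := by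
    have h := solveLoop_eq_emitP A A.sum A.reverse ""
    simp only [List.sum_reverse, sub_self, List.reverse_reverse] at h
    rw [← emitP_eq_emitCat]
    simpa [solve, PySem.List.slice?_none_none_neg_one, String.append_empty] using h
  set tw := ((buildP A 0).reverse).takeWhile (fun p => decide (p ≠ 0)) with htw
  have hB : solve_alt A = emitCat A A.sum tw := by
    simp only [solve_alt]
    rw [foldl_map_comm, List.map_map, candLoop_eq, ← htw]
    rw [← List.map_reverse, ← List.filter_reverse]
    rw [filter_map_comm, List.map_map]
    rw [List.filter_filter]
    have hkey := join_filter_eq_emitCat A A.sum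
      (fun L => decide (solveInner A 0 L = 0) && decide (PySem.Int.mod A.sum L = 0))
      (fun L => by
        by_cases h2 : PySem.Int.mod A.sum L = 0
        · by_cases h1 : solveInner A 0 L = 0 <;>
            simp [h1, h2, (mod_sub_self_eq_zero_iff A.sum L).mpr h2]
        · have h3 : ¬ PySem.Int.mod (A.sum - L) L = 0 :=
            fun hh => h2 ((mod_sub_self_eq_zero_iff A.sum L).mp hh)
          simp [h2, h3])
      tw.reverse
    rw [List.reverse_reverse] at hkey
    have hfun : ((fun t : Int × Int × Bool => PySem.Int.toStr t.1) ∘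
          (fun t => List.foldl (fun t j => stepB j t) t A) ∘ fun L : Int => (L, (0 : Int), false))
        = fun L : Int => PySem.Int.toStr L := by
      funext L
      simp only [Function.comp, (foldl_live A L 0).1]
    have hpred : (fun a : Int => decide ((((fun t => List.foldl (fun t j => stepB j t) t A) ∘
            fun L : Int => (L, (0 : Int), false)) a).2.1 = 0)
          && decide (PySem.Int.mod A.sum a = 0))
        = fun L : Int => decide (solveInner A 0 L = 0) && decide (PySem.Int.mod A.sum L = 0) := by
      funext L
      simp only [Function.comp, (foldl_live A L 0).2]
    rw [hfun, hpred]
    exact hkey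
  rw [hA, hB]
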